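-- pv_equiv track=rewrite | github.com/martinjizdny/Python | PythonApplication-Codility_Tests/PythonApplication-Codility_Tests/Easy/EasyFunctions.py | solution_BinaryGap
-- ===== SOURCE A (Python) =====
-- def solution_BinaryGap(N):
--     #https://www.rapidtables.com/convert/number/binary-to-decimal.html?x=1001100001000001
--     binary_number = bin(N)[2:]
--     counter = 0
--     one_first = False
--     one_second = False
--     biggest_space = 0
--
--     for bit in binary_number:
--         if bit == '1' and one_first == False:
--             one_first = True
--             continue
--         elif one_first == True and bit != '1':
--             counter += 1
--         elif one_first == True and bit == '1':
--             if counter > biggest_space: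
--                 biggest_space = counter
--             one_second = True
--             counter = 0
--
--     return biggest_space if one_second == True else 0
-- ===== SOURCE B (Python) =====
-- def solution_BinaryGap(N):
--     # split the binary string on '1'; interior parts are exactly the bounded zero-gaps
--     binary_number = bin(N)[2:]
--     parts = binary_number.split('1')
--     return max((len(g) for g in parts[1:-1]), default=0)
-- ===== Notes on version B (the rewrite author's own statement) =====
-- stated objective: simpler
-- what changed: Replaces A's per-bit two-flag state machine with split-on-'1' and a max over the interior zero-run lengths.
import Mathlib
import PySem

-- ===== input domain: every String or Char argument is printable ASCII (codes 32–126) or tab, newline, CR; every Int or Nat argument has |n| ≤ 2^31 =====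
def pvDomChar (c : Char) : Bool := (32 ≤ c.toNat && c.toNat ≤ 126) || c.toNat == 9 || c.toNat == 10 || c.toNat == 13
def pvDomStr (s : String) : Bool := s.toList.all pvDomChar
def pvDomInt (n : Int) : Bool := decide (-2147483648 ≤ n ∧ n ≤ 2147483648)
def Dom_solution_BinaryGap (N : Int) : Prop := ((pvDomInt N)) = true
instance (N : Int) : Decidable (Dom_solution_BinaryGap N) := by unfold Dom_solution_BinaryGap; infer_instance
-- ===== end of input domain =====

-- B replaces A's per-bit two-flag state machine by split-on-'1' plus a max over the
-- interior zero-run lengths (objective: simpler; same asymptotic cost).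

-- ===== PORT A =====
-- the body of A's for-loop, acting on the state (counter, one_first, one_second, biggest_space)
def pvStepA (st : Int × Bool × Bool × Int) (bit : Char) : Int × Bool × Bool × Int :=
  let (counter, one_first, one_second, biggest_space) := st
  if bit = '1' ∧ one_first = false then
    (counter, true, one_second, biggest_space)          -- one_first = True; continue
  else if one_first = true ∧ bit ≠ '1' then
    (counter + 1, one_first, one_second, biggest_space) -- counter += 1
  else if one_first = true ∧ bit = '1' then
    (0, one_first, true, if counter > biggest_space then counter else biggest_space)
  else
    (counter, one_first, one_second, biggest_space)

def solution_BinaryGap (N : Int) : Int :=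
  let binary_number : List Char := PySem.List.slice (PySem.Int.pyBin N).toList (some 2) none
  let st := binary_number.foldl pvStepA (0, false, false, 0)
  if st.2.2.1 = true then st.2.2.2 else 0

-- ===== PORT B =====
def solution_BinaryGap_alt (N : Int) : Int :=
  let binary_number : List Char := PySem.List.slice (PySem.Int.pyBin N).toList (some 2) none
  let parts : List (List Char) := binary_number.splitOn '1'          -- binary_number.split('1')
  let interior := PySem.List.slice parts (some 1) (some (-1))        -- parts[1:-1]
  (PySem.List.max? (interior.map PySem.List.len) id).getD 0          -- max(lengths, default=0)

-- ===== PRECONDITION & SPEC =====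
def Spec_solution_BinaryGap (N : Int) (out : Int) : Prop := out = solution_BinaryGap_alt N
instance (N : Int) (out : Int) : Decidable (Spec_solution_BinaryGap N out) := by unfold Spec_solution_BinaryGap; infer_instance

-- ===== CLAIM (what is proved, stated in full; the proofs are below) =====
def Claim_equal_solution_BinaryGap : Prop := ∀ (N : Int), Dom_solution_BinaryGap N → Spec_solution_BinaryGap N (solution_BinaryGap N)

-- ===== LEMMAS AND PROOFS =====

-- A's return expression, as a function of the final loop state
def pvFin (st : Int × Bool × Bool × Int) : Int := if st.2.2.1 = true then st.2.2.2 else 0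

-- value A's loop yields from state (c, true, f2, b) on the remaining bits, expressed on the split
def pvSpec1 (ps : List (List Char)) (c b : Int) (f2 : Bool) : Int :=
  match ps with
  | [] => 0
  | [_] => if f2 then b else 0
  | p :: rest => (rest.dropLast.map (fun q => (q.length : Int))).foldl max (max b (c + p.length))

lemma pv_max?_cons (ys : List Int) : ∀ (y : Int), PySem.List.max? (y :: ys) id = some (ys.foldl max y) := by
  induction ys with
  | nil => intro y; rfl
  | cons z zs ih =>
    intro y
    have h1 : PySem.List.max? (y :: z :: zs) id = PySem.List.max? (max y z :: zs) id := by
      simp only [PySem.List.max?, List.foldl]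
      congr 1
      by_cases h : y < z <;> simp [h, max_def] <;> omega
    rw [h1, ih, List.foldl_cons]

lemma pv_slice_interior (ps : List (List Char)) :
    PySem.List.slice ps (some 1) (some (-1)) = ps.tail.dropLast := by
  cases ps with
  | nil => simp [PySem.List.slice, PySem.List.clampIdx]
  | cons p rest =>
    simp [PySem.List.slice, PySem.List.clampIdx, List.dropLast_eq_take]
    split <;> omega

lemma pv_phase1 (l : List Char) (c b : Int) (f2 : Bool) :
    pvFin (l.foldl pvStepA (c, true, f2, b))
      = pvSpec1 (List.splitOnP (· == '1') l) c b f2 := by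
  induction l generalizing c b f2 with
  | nil => simp [pvFin, pvSpec1, List.splitOnP_nil]
  | cons x l ih =>
    rw [List.foldl_cons, List.splitOnP_cons]
    by_cases hx : x = '1'
    · have hstep : pvStepA (c, true, f2, b) x
          = (0, true, true, if c > b then c else b) := by
        simp [pvStepA, hx]
      rw [hstep, ih, hx]
      simp only [beq_self_eq_true, if_pos]
      rcases hps : List.splitOnP (· == '1') l with _ | ⟨p, rest⟩
      · exact absurd hps (List.splitOnP_ne_nil _ _)
      · rcases rest with _ | ⟨q, rest'⟩
        · simp [pvSpec1]
          omega
        · simp [pvSpec1, max_def]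
          congr 1
          omega
    · have hstep : pvStepA (c, true, f2, b) x
          = (c + 1, true, f2, b) := by
        simp [pvStepA, hx]
      rw [hstep, ih]
      have hbe : (x == '1') = false := by simp [hx]
      rw [hbe]
      simp only [Bool.false_eq_true, if_neg, not_false_eq_true]
      rcases hps : List.splitOnP (· == '1') l with _ | ⟨p, rest⟩
      · exact absurd hps (List.splitOnP_ne_nil _ _)
      · rcases rest with _ | ⟨q, rest'⟩
        · simp [pvSpec1]
        · simp [pvSpec1]
          congr 2
          omega

-- B's value on an arbitrary bit string
def pvBval (l : List Char) : Int :=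
  (PySem.List.max? ((PySem.List.slice (l.splitOn '1') (some 1) (some (-1))).map PySem.List.len) id).getD 0

lemma pv_phase0 (l : List Char) :
    pvFin (l.foldl pvStepA (0, false, false, 0)) = pvBval l := by
  induction l with
  | nil =>
    simp [pvFin, pvBval, List.splitOn, List.splitOnP_nil, pv_slice_interior, PySem.List.max?]
  | cons x l ih =>
    rw [List.foldl_cons]
    by_cases hx : x = '1'
    · have hstep : pvStepA (0, false, false, 0) x = (0, true, false, 0) := by
        simp [pvStepA, hx]
      rw [hstep, pv_phase1]
      unfold pvBval
      rw [List.splitOn, List.splitOnP_cons, pv_slice_interior]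
      have hbe : (x == '1') = true := by simp [hx]
      rw [hbe]
      simp only [if_pos]
      rcases hps : List.splitOnP (· == '1') l with _ | ⟨p, rest⟩
      · exact absurd hps (List.splitOnP_ne_nil _ _)
      · rcases rest with _ | ⟨q, rest'⟩
        · simp [pvSpec1, PySem.List.max?]
        · simp only [List.tail_cons, List.dropLast_cons₂, List.map_cons, PySem.List.len_eq]
          rw [pv_max?_cons _ _]
          simp only [Option.getD_some, pvSpec1]
          have hlen : ∀ (qs : List (List Char)) (a : Int), 0 ≤ a →
              (qs.map (fun q => ((q.length : Int)))).foldl max a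
                = (qs.map PySem.List.len).foldl max a := by
            intro qs
            induction qs with
            | nil => intro a _; rfl
            | cons w ws ihw =>
              intro a ha
              simp only [List.map_cons, List.foldl_cons, PySem.List.len_eq]
              exact ihw _ (le_trans ha (le_max_left _ _))
          have h0 : max (0 : Int) (0 + (p.length : Int)) = (p.length : Int) := by
            have : (0:Int) ≤ (p.length : Int) := Int.natCast_nonneg _
            omega
          rw [h0]
          have := hlen ((q :: rest').dropLast) ((p.length : Int)) (Int.natCast_nonneg _)
          calc ((q :: rest').dropLast.map (fun q => ((q.length : Int)))).foldl max ((p.length : Int))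
              = ((q :: rest').dropLast.map PySem.List.len).foldl max ((p.length : Int)) := this
            _ = List.foldl max ((p.length : Int)) ((q :: rest').dropLast.map PySem.List.len) := rfl
    · have hstep : pvStepA (0, false, false, 0) x = (0, false, false, 0) := by
        simp [pvStepA, hx]
      rw [hstep, ih]
      unfold pvBval
      rw [List.splitOn, List.splitOn, List.splitOnP_cons]
      have hbe : (x == '1') = false := by simp [hx]
      rw [hbe]
      simp only [Bool.false_eq_true, if_neg, not_false_eq_true]
      rw [pv_slice_interior, pv_slice_interior, List.tail_modifyHead]

-- ===== VERDICT (by name: the statement is the Claim_ definition above) =====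
theorem solution_BinaryGap_spec : Claim_equal_solution_BinaryGap := by
  intro N _
  unfold Spec_solution_BinaryGap solution_BinaryGap solution_BinaryGap_alt
  have := pv_phase0 (PySem.List.slice (PySem.Int.pyBin N).toList (some 2) none)
  unfold pvBval pvFin at this
  exact this
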